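-- pv_equiv track=rewrite | github.com/miramastoras/centrolign_analysis | analysis_notes/release2_QC_v2/permutation_test_scripts/localID_minus_CDR_permutation_per_chrom_short_indels.py | interval_subtract
-- ===== SOURCE A (Python) =====
-- def interval_subtract(intervals_a, intervals_b):
--     """Return parts of intervals_a not overlapping intervals_b (A - B)."""
--     result = []
--     for a_start, a_end in sorted(intervals_a):
--         pieces = [(a_start, a_end)]
--         for b_start, b_end in sorted(intervals_b):
--             new_pieces = []
--             for p_start, p_end in pieces:
--                 if b_end <= p_start or b_start >= p_end:
--                     new_pieces.append((p_start, p_end))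
--                 else:
--                     if p_start < b_start:
--                         new_pieces.append((p_start, b_start))
--                     if p_end > b_end:
--                         new_pieces.append((b_end, p_end))
--             pieces = new_pieces
--         result.extend(pieces)
--     return sorted(result)
-- ===== SOURCE B (Python) =====
-- def interval_subtract(intervals_a, intervals_b):
--     """Return parts of intervals_a not overlapping intervals_b (A - B).
--
--     One sorted sweep over B per A-interval with a single moving cursor
--     (no per-B rebuilding of a pieces list), breaking early once B starts
--     at or after the piece's end.
--     """
--     bs = sorted(intervals_b)
--     result = []
--     for a_start, a_end in sorted(intervals_a):
--         cur = a_start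
--         alive = True
--         for b_start, b_end in bs:
--             if b_start >= a_end:
--                 break
--             if b_end <= cur:
--                 continue
--             if cur < b_start:
--                 result.append((cur, b_start))
--             if a_end > b_end:
--                 cur = b_end
--             else:
--                 alive = False
--                 break
--         if alive:
--             result.append((cur, a_end))
--     return sorted(result)
-- ===== Notes on version B (the rewrite author's own statement) =====
-- stated objective: faster
-- what changed: A re-sorts intervals_b and rebuilds a whole pieces list for every B-interval inside the loop over A; B sorts B once and, per A-interval, does one sweep over sorted B with a single moving cursor, breaking as soon as a B-interval starts at or past the piece's end.
import Mathlib
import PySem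

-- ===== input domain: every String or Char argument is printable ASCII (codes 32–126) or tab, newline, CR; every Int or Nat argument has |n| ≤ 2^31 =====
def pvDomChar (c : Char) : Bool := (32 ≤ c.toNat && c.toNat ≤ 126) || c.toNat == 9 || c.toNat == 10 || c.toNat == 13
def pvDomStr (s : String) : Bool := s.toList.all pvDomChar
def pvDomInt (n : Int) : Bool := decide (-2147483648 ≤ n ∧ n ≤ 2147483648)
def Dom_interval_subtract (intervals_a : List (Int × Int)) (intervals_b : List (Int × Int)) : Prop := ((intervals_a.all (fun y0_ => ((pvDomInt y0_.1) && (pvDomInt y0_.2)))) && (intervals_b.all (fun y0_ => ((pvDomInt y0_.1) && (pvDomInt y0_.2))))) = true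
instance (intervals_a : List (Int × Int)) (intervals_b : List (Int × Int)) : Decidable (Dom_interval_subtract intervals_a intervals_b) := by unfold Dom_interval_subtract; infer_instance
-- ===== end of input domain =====

-- B replaces A's per-B rebuilding of a pieces list by one cursor sweep over sorted B per A-interval (alternative decomposition; same results).

-- ===== PORT A =====
-- inner loop body: 'for p in pieces: …append…' on accumulator new_pieces
def pvA_inner (b : Int × Int) (np : List (Int × Int)) (p : Int × Int) : List (Int × Int) :=
  if b.2 ≤ p.1 ∨ b.1 ≥ p.2 then np ++ [(p.1, p.2)]
  else
    let np1 := if p.1 < b.1 then np ++ [(p.1, b.1)] else np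
    if p.2 > b.2 then np1 ++ [(b.2, p.2)] else np1

-- middle loop body: 'pieces = new_pieces' after the inner loop
def pvA_step (pieces : List (Int × Int)) (b : Int × Int) : List (Int × Int) :=
  pieces.foldl (pvA_inner b) []

def interval_subtract (intervals_a : List (Int × Int)) (intervals_b : List (Int × Int)) : List (Int × Int) :=
  let result := (PySem.List.sorted2 intervals_a Prod.fst Prod.snd).foldl
    (fun result a =>
      result ++ (PySem.List.sorted2 intervals_b Prod.fst Prod.snd).foldl pvA_step [(a.1, a.2)]) []
  PySem.List.sorted2 result Prod.fst Prod.snd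

-- ===== PORT B =====
-- the cursor sweep over sorted B for one A-interval (cur = left edge still alive)
def pvB_cut (pe : Int) : Int → List (Int × Int) → List (Int × Int)
  | cur, [] => [(cur, pe)]
  | cur, b :: rest =>
    if b.1 ≥ pe then [(cur, pe)]                       -- break: B sorted by start, nothing later can overlap
    else if b.2 ≤ cur then pvB_cut pe cur rest         -- continue
    else if pe > b.2 then
      (if cur < b.1 then [(cur, b.1)] else []) ++ pvB_cut pe b.2 rest
    else
      (if cur < b.1 then [(cur, b.1)] else [])         -- piece consumed: alive = False, break

def interval_subtract_alt (intervals_a : List (Int × Int)) (intervals_b : List (Int × Int)) : List (Int × Int) :=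
  let bs := PySem.List.sorted2 intervals_b Prod.fst Prod.snd
  let result := (PySem.List.sorted2 intervals_a Prod.fst Prod.snd).foldl
    (fun r a => r ++ pvB_cut a.2 a.1 bs) []
  PySem.List.sorted2 result Prod.fst Prod.snd

-- ===== PRECONDITION & SPEC =====
def Spec_interval_subtract (intervals_a : List (Int × Int)) (intervals_b : List (Int × Int)) (out : List (Int × Int)) : Prop := out = interval_subtract_alt intervals_a intervals_b
instance (intervals_a : List (Int × Int)) (intervals_b : List (Int × Int)) (out : List (Int × Int)) : Decidable (Spec_interval_subtract intervals_a intervals_b out) := by unfold Spec_interval_subtract; infer_instance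

-- ===== CLAIM (what is proved, stated in full; the proofs are below) =====
def Claim_equal_interval_subtract : Prop := ∀ (intervals_a : List (Int × Int)) (intervals_b : List (Int × Int)), Dom_interval_subtract intervals_a intervals_b → Spec_interval_subtract intervals_a intervals_b (interval_subtract intervals_a intervals_b)

-- ===== LEMMAS AND PROOFS =====

-- the pieces produced from one piece by one B-interval
def pvSeg (b p : Int × Int) : List (Int × Int) :=
  if b.2 ≤ p.1 ∨ b.1 ≥ p.2 then [(p.1, p.2)]
  else (if p.1 < b.1 then [(p.1, b.1)] else []) ++ (if p.2 > b.2 then [(b.2, p.2)] else [])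

lemma pvA_inner_eq (b : Int × Int) (np : List (Int × Int)) (p : Int × Int) :
    pvA_inner b np p = np ++ pvSeg b p := by
  unfold pvA_inner pvSeg
  split_ifs <;> simp

lemma pvA_step_eq (pieces : List (Int × Int)) (b : Int × Int) :
    pvA_step pieces b = pieces.flatMap (pvSeg b) := by
  unfold pvA_step
  have h : pvA_inner b = fun acc p => acc ++ pvSeg b p :=
    funext fun acc => funext fun p => pvA_inner_eq b acc p
  rw [h, PySem.List.foldl_append_eq_flatMap]
  simp

lemma pvA_step_append (ps qs : List (Int × Int)) (b : Int × Int) :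
    pvA_step (ps ++ qs) b = pvA_step ps b ++ pvA_step qs b := by
  simp [pvA_step_eq]

lemma foldl_step_nil (bs : List (Int × Int)) :
    bs.foldl pvA_step [] = [] := by
  induction bs with
  | nil => rfl
  | cons b rest ih => simp [List.foldl_cons, pvA_step_eq, ih]

lemma foldl_step_append (bs ps qs : List (Int × Int)) :
    bs.foldl pvA_step (ps ++ qs) = bs.foldl pvA_step ps ++ bs.foldl pvA_step qs := by
  induction bs generalizing ps qs with
  | nil => rfl
  | cons b rest ih => simp only [List.foldl_cons, pvA_step_append, ih]

lemma foldl_step_stable (bs : List (Int × Int)) (cur pe : Int)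
    (h : ∀ b ∈ bs, pe ≤ b.1) :
    bs.foldl pvA_step [(cur, pe)] = [(cur, pe)] := by
  induction bs with
  | nil => rfl
  | cons b rest ih =>
    have hb : pe ≤ b.1 := h b (by simp)
    have hstep : pvA_step [(cur, pe)] b = [(cur, pe)] := by
      simp [pvA_step_eq, pvSeg, hb]
    rw [List.foldl_cons, hstep]
    exact ih (fun b' hb' => h b' (by simp [hb']))

lemma pvB_cut_cons (pe cur : Int) (b : Int × Int) (rest : List (Int × Int)) :
    pvB_cut pe cur (b :: rest) =
      if b.1 ≥ pe then [(cur, pe)]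
      else if b.2 ≤ cur then pvB_cut pe cur rest
      else if pe > b.2 then
        (if cur < b.1 then [(cur, b.1)] else []) ++ pvB_cut pe b.2 rest
      else
        (if cur < b.1 then [(cur, b.1)] else []) := rfl

lemma foldl_step_eq_cut (bs : List (Int × Int))
    (hs : bs.Pairwise (fun x y => x.1 ≤ y.1)) :
    ∀ cur pe, bs.foldl pvA_step [(cur, pe)] = pvB_cut pe cur bs := by
  induction bs with
  | nil => intro cur pe; rfl
  | cons b rest ih =>
    intro cur pe
    rw [List.pairwise_cons] at hs
    obtain ⟨hhead, hrest⟩ := hs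
    rw [List.foldl_cons]
    by_cases hbrk : pe ≤ b.1
    · -- break case: all of rest also starts at or past pe
      have hstep : pvA_step [(cur, pe)] b = [(cur, pe)] := by
        simp [pvA_step_eq, pvSeg, hbrk]
      rw [hstep, foldl_step_stable rest cur pe
        (fun b' hb' => le_trans hbrk (hhead b' hb'))]
      rw [pvB_cut_cons, if_pos hbrk]
    · by_cases hskip : b.2 ≤ cur
      · have hstep : pvA_step [(cur, pe)] b = [(cur, pe)] := by
          simp [pvA_step_eq, pvSeg, hskip]
        rw [hstep, ih hrest cur pe, pvB_cut_cons, if_neg hbrk, if_pos hskip]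
      · -- overlap
        have hstep : pvA_step [(cur, pe)] b
            = (if cur < b.1 then [(cur, b.1)] else []) ++ (if pe > b.2 then [(b.2, pe)] else []) := by
          simp [pvA_step_eq, pvSeg, hbrk, hskip]
        rw [hstep, foldl_step_append]
        have hleft : rest.foldl pvA_step (if cur < b.1 then [(cur, b.1)] else [])
            = (if cur < b.1 then [(cur, b.1)] else []) := by
          by_cases hc : cur < b.1
          · simp only [if_pos hc]
            exact foldl_step_stable rest cur b.1 (fun b' hb' => hhead b' hb')
          · simp only [if_neg hc]
            exact foldl_step_nil rest
        rw [hleft]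
        by_cases hr : b.2 < pe
        · rw [if_pos hr, ih hrest b.2 pe, pvB_cut_cons, if_neg hbrk, if_neg hskip, if_pos hr]
        · rw [if_neg hr, foldl_step_nil, List.append_nil,
            pvB_cut_cons, if_neg hbrk, if_neg hskip, if_neg hr]

-- sorted2 (Python's tuple sort) orders pairs with nondecreasing first components
lemma sorted2_fst_pairwise (xs : List (Int × Int)) :
    (PySem.List.sorted2 xs Prod.fst Prod.snd).Pairwise (fun x y => x.1 ≤ y.1) := by
  have hkey : (fun (a b : Int × Int) => decide (a.1 < b.1) || (!decide (b.1 < a.1) && decide (a.2 < b.2)))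
      = (fun a b => decide ((toLex a : Lex (Int × Int)) < toLex b)) := by
    funext a b
    simp only [Prod.Lex.toLex_lt_toLex]
    by_cases h1 : a.1 < b.1 <;> by_cases h2 : b.1 < a.1 <;> by_cases h3 : a.2 < b.2 <;>
      simp [h1, h2, h3] <;> omega
  have hmain : ∀ (ys acc : List (Int × Int)),
      acc.Pairwise (fun x y : Int × Int => (toLex x : Lex (Int × Int)) ≤ toLex y) →
      (ys.foldl (fun acc x => PySem.List.insertBy
        (fun a b => decide ((toLex a : Lex (Int × Int)) < toLex b)) x acc) acc).Pairwise
        (fun x y : Int × Int => (toLex x : Lex (Int × Int)) ≤ toLex y) := by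
    intro ys
    induction ys with
    | nil => intro acc h; exact h
    | cons y t ih =>
      intro acc h
      rw [List.foldl_cons]
      exact ih _ (PySem.List.insertBy_pairwise_le (fun p : Int × Int => (toLex p : Lex (Int × Int))) y acc h)
  have hsorted : (PySem.List.sorted2 xs Prod.fst Prod.snd).Pairwise
      (fun x y : Int × Int => (toLex x : Lex (Int × Int)) ≤ toLex y) := by
    unfold PySem.List.sorted2
    simp only [if_neg (by simp : ¬ (false = true))]
    rw [hkey]
    exact hmain xs [] List.Pairwise.nil
  refine hsorted.imp ?_
  intro a b hab
  rcases Prod.Lex.toLex_le_toLex.mp hab with h | ⟨h1, _⟩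
  · exact le_of_lt h
  · exact le_of_eq h1

-- ===== VERDICT (by name: the statement is the Claim_ definition above) =====
theorem interval_subtract_spec : Claim_equal_interval_subtract := by
  intro ia ib _
  unfold Spec_interval_subtract interval_subtract interval_subtract_alt
  have h := sorted2_fst_pairwise ib
  have hf : (fun (result : List (Int × Int)) (a : Int × Int) =>
      result ++ (PySem.List.sorted2 ib Prod.fst Prod.snd).foldl pvA_step [(a.1, a.2)])
    = fun r a => r ++ pvB_cut a.2 a.1 (PySem.List.sorted2 ib Prod.fst Prod.snd) := by
    funext r a
    rw [foldl_step_eq_cut _ h a.1 a.2]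
  rw [hf]
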